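-- pv_equiv track=rewrite | github.com/summyhug/proplaw | propra/data/generate_lbo_inventory.py | _trim_to_occurrence
-- ===== SOURCE A (Python) =====
-- def _trim_to_occurrence(txt: str, marker: str, occurrence: int) -> str:
--     """Drop everything before the Nth occurrence of a marker string."""
--     if occurrence <= 1:
--         return txt
--     start = 0
--     found = -1
--     for _ in range(occurrence):
--         found = txt.find(marker, start)
--         if found == -1:
--             return txt
--         start = found + len(marker)
--     return txt[found:]
-- ===== SOURCE B (Python) =====
-- def _trim_to_occurrence(txt: str, marker: str, occurrence: int) -> str:
--     """Drop everything before the Nth occurrence of a marker string."""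
--     if occurrence <= 1 or not marker:
--         return txt
--     parts = txt.split(marker)
--     if len(parts) <= occurrence:
--         return txt
--     return txt[len(marker.join(parts[:occurrence])):]
-- ===== Notes on version B (the rewrite author's own statement) =====
-- stated objective: alternative
-- what changed: Replaces the occurrence-by-occurrence scanning loop of repeated txt.find calls with a single txt.split(marker), deriving the cut position arithmetically as the length of the first `occurrence` parts rejoined.
import Mathlib
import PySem

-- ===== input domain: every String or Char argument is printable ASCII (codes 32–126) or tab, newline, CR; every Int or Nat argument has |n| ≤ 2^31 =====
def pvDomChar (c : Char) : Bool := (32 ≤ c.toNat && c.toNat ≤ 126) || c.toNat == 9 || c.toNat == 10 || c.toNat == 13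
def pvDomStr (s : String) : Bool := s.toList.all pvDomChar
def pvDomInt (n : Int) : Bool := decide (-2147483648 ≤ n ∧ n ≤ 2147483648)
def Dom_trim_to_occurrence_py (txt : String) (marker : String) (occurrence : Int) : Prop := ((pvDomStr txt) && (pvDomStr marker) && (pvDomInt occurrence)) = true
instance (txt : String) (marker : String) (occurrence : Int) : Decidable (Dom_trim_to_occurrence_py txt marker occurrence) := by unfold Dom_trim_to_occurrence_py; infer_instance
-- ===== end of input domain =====

-- B replaces A's occurrence-by-occurrence scanning loop of repeated find calls with one split
-- and an arithmetic cut position (objective: alternative; return values proved equal).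

-- ===== PORT A =====
-- A's 'for _ in range(occurrence)' loop with early returns: state (start, found), fuel = occurrence.
def trimA_loop (txt : String) (marker : String) : Nat → Int → Int → String
  | 0, _, found => PySem.Str.slice txt (some found) none        -- return txt[found:]
  | n+1, start, _ =>
      let found := PySem.Str.findFrom txt marker start          -- found = txt.find(marker, start)
      if found = -1 then txt
      else trimA_loop txt marker n (found + PySem.Str.len marker) found

def trim_to_occurrence_py (txt : String) (marker : String) (occurrence : Int) : String :=
  if occurrence ≤ 1 then txt
  else trimA_loop txt marker occurrence.toNat 0 (-1)

-- ===== PORT B =====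
-- parts = txt.split(marker) is PySem.Chars.splitOn (marker is non-empty past the guard, where
-- Python's split cannot raise); the split is written inline where Source B names it 'parts'.
def trim_to_occurrence_py_alt (txt : String) (marker : String) (occurrence : Int) : String :=
  if occurrence ≤ 1 ∨ marker.toList = [] then txt               -- if occurrence <= 1 or not marker
  else if ((PySem.Chars.splitOn txt.toList marker.toList).length : Int) ≤ occurrence then txt
  else                                                          -- txt[len(marker.join(parts[:occurrence])):]
    PySem.Str.slice txt
      (some (((PySem.Chars.join marker.toList
        (PySem.List.slice (PySem.Chars.splitOn txt.toList marker.toList) none (some occurrence))).length : Nat) : Int)) none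

-- ===== PRECONDITION & SPEC =====
def Spec_trim_to_occurrence_py (txt : String) (marker : String) (occurrence : Int) (out : String) : Prop := out = trim_to_occurrence_py_alt txt marker occurrence
instance (txt : String) (marker : String) (occurrence : Int) (out : String) : Decidable (Spec_trim_to_occurrence_py txt marker occurrence out) := by unfold Spec_trim_to_occurrence_py; infer_instance

-- ===== CLAIM (what is proved, stated in full; the proofs are below) =====
def Claim_equal_trim_to_occurrence_py : Prop := ∀ (txt : String) (marker : String) (occurrence : Int), Dom_trim_to_occurrence_py txt marker occurrence → Spec_trim_to_occurrence_py txt marker occurrence (trim_to_occurrence_py txt marker occurrence)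

-- ===== LEMMAS AND PROOFS =====

lemma splitOn_nil (sep : List Char) : PySem.Chars.splitOn ([] : List Char) sep = [[]] := by
  unfold PySem.Chars.splitOn
  rw [PySem.Chars.splitOn.go]
  · simp
  · omega

-- splitOn.go with running state (cur, acc) equals splitOn of the remaining input,
-- with cur.reverse prepended to the first piece and acc.reverse in front.
lemma splitOn_go_spec (sep : List Char) (hsep : sep ≠ []) (l : List Char) (fuel : Nat)
    (cur : List Char) (acc : List (List Char)) (h : l.length < fuel) :
    PySem.Chars.splitOn.go sep fuel l cur acc
      = acc.reverse ++ (PySem.Chars.splitOn l sep).modifyHead (cur.reverse ++ ·) := by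
  have hm : 0 < sep.length := List.length_pos_iff.mpr hsep
  cases fuel with
  | zero => omega
  | succ fl =>
    cases l with
    | nil =>
      rw [PySem.Chars.splitOn.go, splitOn_nil]
      · simp
      · omega
    | cons c rest =>
      have e : PySem.Chars.splitOn (c :: rest) sep
          = PySem.Chars.splitOn.go sep ((c :: rest).length + 1) (c :: rest) [] [] := rfl
      have hlt1 : (List.drop sep.length (c :: rest)).length < fl := by
        simp only [List.length_drop, List.length_cons]
        simp only [List.length_cons] at h
        omega
      have hlt2 : (List.drop sep.length (c :: rest)).length < (c :: rest).length := by
        simp only [List.length_drop, List.length_cons]; omega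
      rw [PySem.Chars.splitOn.go]
      by_cases hp : sep.isPrefixOf (c :: rest)
      · rw [if_pos hp, splitOn_go_spec sep hsep _ fl [] _ hlt1]
        rw [e, PySem.Chars.splitOn.go, if_pos hp,
            splitOn_go_spec sep hsep _ _ [] _ hlt2]
        cases PySem.Chars.splitOn (List.drop sep.length (c :: rest)) sep with
        | nil => simp
        | cons a t => simp
      · rw [if_neg hp,
            splitOn_go_spec sep hsep rest fl (c :: cur) acc
              (by simp only [List.length_cons] at h; omega)]
        rw [e, PySem.Chars.splitOn.go, if_neg hp,
            splitOn_go_spec sep hsep rest _ [c] [] (by simp)]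
        cases PySem.Chars.splitOn rest sep with
        | nil => simp
        | cons a t => simp
termination_by l.length
decreasing_by
  all_goals simp_all

-- one-step unfolding of splitOn
lemma splitOn_cons (sep : List Char) (hsep : sep ≠ []) (c : Char) (rest : List Char) :
    PySem.Chars.splitOn (c :: rest) sep
      = if sep.isPrefixOf (c :: rest)
        then [] :: PySem.Chars.splitOn (List.drop sep.length (c :: rest)) sep
        else (PySem.Chars.splitOn rest sep).modifyHead (c :: ·) := by
  have hm : 0 < sep.length := List.length_pos_iff.mpr hsep
  have e : PySem.Chars.splitOn (c :: rest) sep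
      = PySem.Chars.splitOn.go sep ((c :: rest).length + 1) (c :: rest) [] [] := rfl
  rw [e, PySem.Chars.splitOn.go]
  by_cases hp : sep.isPrefixOf (c :: rest)
  · rw [if_pos hp, if_pos hp,
        splitOn_go_spec sep hsep _ _ [] _ (by simp only [List.length_drop, List.length_cons]; omega)]
    cases PySem.Chars.splitOn (List.drop sep.length (c :: rest)) sep with
    | nil => simp
    | cons a t => simp
  · rw [if_neg hp, if_neg hp, splitOn_go_spec sep hsep rest _ [c] [] (by simp)]
    cases PySem.Chars.splitOn rest sep with
    | nil => simp
    | cons a t => simp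

lemma splitOn_ne_nil (sep : List Char) (hsep : sep ≠ []) (l : List Char) :
    PySem.Chars.splitOn l sep ≠ [] := by
  induction l with
  | nil => rw [splitOn_nil]; simp
  | cons c rest ih =>
    rw [splitOn_cons sep hsep]
    by_cases hp : sep.isPrefixOf (c :: rest)
    · simp [hp]
    · rw [if_neg hp]
      intro hcontra
      apply ih
      cases h : PySem.Chars.splitOn rest sep with
      | nil => rfl
      | cons a t => rw [h] at hcontra; simp at hcontra

-- if the separator does not occur, split returns the whole string
lemma splitOn_no_match (sep : List Char) (hsep : sep ≠ []) (l : List Char)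
    (h : ¬ sep <:+: l) : PySem.Chars.splitOn l sep = [l] := by
  induction l with
  | nil => exact splitOn_nil sep
  | cons c rest ih =>
    rw [splitOn_cons sep hsep]
    have hp : ¬ sep.isPrefixOf (c :: rest) := by
      intro hp
      exact h ((List.isPrefixOf_iff_prefix.mp hp).isInfix)
    rw [if_neg hp, ih (fun h' => h (h'.trans (List.suffix_cons c rest).isInfix))]
    rfl

-- if the FIRST occurrence of sep starts at f, split peels off take f and recurses past it
lemma splitOn_match_step (sep : List Char) (hsep : sep ≠ []) :
    ∀ (f : Nat) (l : List Char), sep <+: List.drop f l → (∀ i < f, ¬ sep <+: List.drop i l) →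
      PySem.Chars.splitOn l sep
        = List.take f l :: PySem.Chars.splitOn (List.drop (f + sep.length) l) sep := by
  intro f
  induction f with
  | zero =>
    intro l hpre _
    simp only [List.drop_zero] at hpre
    have hl : l ≠ [] := by
      intro hl; subst hl; exact hsep (List.prefix_nil.mp hpre)
    cases l with
    | nil => exact absurd rfl hl
    | cons c rest =>
      rw [splitOn_cons sep hsep, if_pos (List.isPrefixOf_iff_prefix.mpr hpre)]
      simp
  | succ k ih =>
    intro l hpre hmin
    have hl : l ≠ [] := by
      intro hl; subst hl
      simp only [List.drop_nil] at hpre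
      exact hsep (List.prefix_nil.mp hpre)
    cases l with
    | nil => exact absurd rfl hl
    | cons c rest =>
      have hp : ¬ sep.isPrefixOf (c :: rest) := by
        intro hp
        exact hmin 0 (by omega) (by simpa using List.isPrefixOf_iff_prefix.mp hp)
      rw [splitOn_cons sep hsep, if_neg hp,
          ih rest (by simpa using hpre) (fun i hi => by simpa using hmin (i+1) (by omega))]
      have e2 : k + 1 + sep.length = (k + sep.length) + 1 := by omega
      rw [e2, List.drop_succ_cons, List.take_succ_cons]
      simp

lemma find_empty_sub (s : List Char) : PySem.Chars.find s ([] : List Char) = 0 := by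
  have h0 : 0 ≤ PySem.Chars.find s ([] : List Char) :=
    (PySem.Chars.find_nonneg_iff s []).mpr List.nil_infix
  obtain ⟨-, hmin⟩ := PySem.Chars.find_spec (s := s) (sub := []) h0
  by_contra hne
  have : 0 < (PySem.Chars.find s ([] : List Char)).toNat := by omega
  exact hmin 0 this (List.nil_prefix)

lemma trimA_loop_zero (txt marker : String) (start fnd : Int) :
    trimA_loop txt marker 0 start fnd = PySem.Str.slice txt (some fnd) none := rfl

lemma trimA_loop_succ (txt marker : String) (n : Nat) (start fnd : Int) :
    trimA_loop txt marker (n+1) start fnd =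
      if PySem.Str.findFrom txt marker start = -1 then txt
      else trimA_loop txt marker n
        (PySem.Str.findFrom txt marker start + PySem.Str.len marker)
        (PySem.Str.findFrom txt marker start) := rfl

-- the A-side loop, characterised through splitOn of the unscanned suffix
lemma loopA_spec (txt marker : String) (hm : marker.toList ≠ []) :
    ∀ (n : Nat), ∀ (st : Nat), st ≤ txt.toList.length → ∀ (fnd : Int),
      trimA_loop txt marker (n+1) (st : Int) fnd
        = if (PySem.Chars.splitOn (txt.toList.drop st) marker.toList).length ≤ n+1 then txt
          else PySem.Str.slice txt
            (some ((st : Int) + ((PySem.Chars.join marker.toList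
              ((PySem.Chars.splitOn (txt.toList.drop st) marker.toList).take (n+1))).length : Int))) none := by
  intro n
  induction n with
  | zero =>
    intro st hst fnd
    rw [trimA_loop_succ, PySem.Str.findFrom_eq, PySem.Chars.findFrom_natCast _ _ st hst]
    by_cases hf : PySem.Chars.find (txt.toList.drop st) marker.toList = -1
    · rw [if_pos hf]
      simp only [reduceIte]
      rw [splitOn_no_match marker.toList hm _
            ((PySem.Chars.find_eq_neg_one_iff _ _).mp hf)]
      simp
    · rw [if_neg hf]
      have hinf := not_not.mp ((PySem.Chars.find_eq_neg_one_iff (txt.toList.drop st) marker.toList).not.mp hf)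
      have h0 : 0 ≤ PySem.Chars.find (txt.toList.drop st) marker.toList :=
        (PySem.Chars.find_nonneg_iff _ _).mpr hinf
      obtain ⟨hpre, hmin⟩ := PySem.Chars.find_spec (s := txt.toList.drop st) (sub := marker.toList) h0
      set f' := (PySem.Chars.find (txt.toList.drop st) marker.toList).toNat with hf'
      have hfcast : PySem.Chars.find (txt.toList.drop st) marker.toList = (f' : Int) :=
        (Int.toNat_of_nonneg h0).symm
      have hfle : f' ≤ (txt.toList.drop st).length := by
        have := PySem.Chars.find_le_length (txt.toList.drop st) marker.toList
        omega
      have hsplit := splitOn_match_step marker.toList hm _ _ hpre hmin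
      rw [if_neg (by rw [hfcast]; omega), hsplit]
      have hP2 : 0 < (PySem.Chars.splitOn (List.drop (f' + marker.toList.length) (txt.toList.drop st)) marker.toList).length :=
        List.length_pos_iff.mpr (splitOn_ne_nil marker.toList hm _)
      rw [if_neg (by simp only [List.length_cons]; omega)]
      rw [trimA_loop_zero]
      congr 2
      rw [List.take_succ_cons, List.take_zero, PySem.Chars.join_singleton, List.length_take,
          hfcast]
      push_cast
      omega
  | succ n ih =>
    intro st hst fnd
    rw [trimA_loop_succ, PySem.Str.findFrom_eq, PySem.Chars.findFrom_natCast _ _ st hst]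
    by_cases hf : PySem.Chars.find (txt.toList.drop st) marker.toList = -1
    · rw [if_pos hf]
      simp only [reduceIte]
      rw [splitOn_no_match marker.toList hm _
            ((PySem.Chars.find_eq_neg_one_iff _ _).mp hf)]
      simp
    · rw [if_neg hf]
      have hinf := not_not.mp ((PySem.Chars.find_eq_neg_one_iff (txt.toList.drop st) marker.toList).not.mp hf)
      have h0 : 0 ≤ PySem.Chars.find (txt.toList.drop st) marker.toList :=
        (PySem.Chars.find_nonneg_iff _ _).mpr hinf
      obtain ⟨hpre, hmin⟩ := PySem.Chars.find_spec (s := txt.toList.drop st) (sub := marker.toList) h0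
      set f' := (PySem.Chars.find (txt.toList.drop st) marker.toList).toNat with hf'
      have hfcast : PySem.Chars.find (txt.toList.drop st) marker.toList = (f' : Int) :=
        (Int.toNat_of_nonneg h0).symm
      have hfle : f' ≤ (txt.toList.drop st).length := by
        have := PySem.Chars.find_le_length (txt.toList.drop st) marker.toList
        omega
      have hfm : f' + marker.toList.length ≤ (txt.toList.drop st).length := by
        have h1 := hpre.length_le
        simp only [List.length_drop] at h1 hfle ⊢
        omega
      have hsplit := splitOn_match_step marker.toList hm _ _ hpre hmin
      rw [if_neg (by rw [hfcast]; omega)]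
      have harg : (st : Int) + PySem.Chars.find (txt.toList.drop st) marker.toList + PySem.Str.len marker
          = ((st + f' + marker.toList.length : Nat) : Int) := by
        rw [PySem.Str.len_eq, hfcast]; push_cast; ring
      rw [harg, ih (st + f' + marker.toList.length)
            (by simp only [List.length_drop] at hfle hfm; omega)]
      have hdd : List.drop (st + f' + marker.toList.length) txt.toList
          = List.drop (f' + marker.toList.length) (txt.toList.drop st) := by
        rw [List.drop_drop]; congr 1; omega
      rw [hdd, hsplit]
      have hP2ne := splitOn_ne_nil marker.toList hm
        (List.drop (f' + marker.toList.length) (txt.toList.drop st))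
      have hP2 : 0 < (PySem.Chars.splitOn (List.drop (f' + marker.toList.length) (txt.toList.drop st)) marker.toList).length :=
        List.length_pos_iff.mpr hP2ne
      by_cases hc : (PySem.Chars.splitOn (List.drop (f' + marker.toList.length) (txt.toList.drop st)) marker.toList).length ≤ n+1
      · rw [if_pos hc, if_pos (by simp only [List.length_cons]; omega)]
      · rw [if_neg hc, if_neg (by simp only [List.length_cons]; omega)]
        congr 2
        rw [List.take_succ_cons]
        cases htk : (PySem.Chars.splitOn (List.drop (f' + marker.toList.length) (txt.toList.drop st)) marker.toList).take (n+1) with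
        | nil =>
          exfalso
          rcases List.take_eq_nil_iff.mp htk with h' | h'
          · omega
          · exact hP2ne h'
        | cons q t =>
          rw [PySem.Chars.join_cons_cons]
          simp only [List.length_append, List.length_take]
          push_cast
          omega

-- with an empty marker, A's find always succeeds at the current start (= 0), so txt[0:] = txt comes back
lemma loopA_empty (txt marker : String) (hm : marker.toList = []) :
    ∀ (n : Nat) (fnd : Int), trimA_loop txt marker (n+1) 0 fnd = txt := by
  intro n
  induction n with
  | zero =>
    intro fnd
    rw [trimA_loop_succ, PySem.Str.findFrom_eq, hm]
    rw [show ((0:Int)) = ((0:Nat):Int) by simp, PySem.Chars.findFrom_natCast _ _ 0 (by simp),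
        List.drop_zero, find_empty_sub]
    simp only [Nat.cast_zero, add_zero]
    rw [trimA_loop_zero]
    apply String.toList_inj.mp
    simp [pysem]
  | succ n ih =>
    intro fnd
    rw [trimA_loop_succ, PySem.Str.findFrom_eq, hm]
    rw [show ((0:Int)) = ((0:Nat):Int) by simp, PySem.Chars.findFrom_natCast _ _ 0 (by simp),
        List.drop_zero, find_empty_sub]
    simp only [Nat.cast_zero, add_zero]
    rw [PySem.Str.len_eq, hm]
    simpa using ih 0

-- ===== VERDICT (by name: the statement is the Claim_ definition above) =====
theorem trim_to_occurrence_py_spec : Claim_equal_trim_to_occurrence_py := by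
  intro txt marker occurrence _
  unfold Spec_trim_to_occurrence_py
  unfold trim_to_occurrence_py trim_to_occurrence_py_alt
  by_cases h1 : occurrence ≤ 1
  · simp [h1]
  · rw [if_neg h1]
    by_cases hm : marker.toList = []
    · rw [if_pos (Or.inr hm)]
      have hk : occurrence.toNat = (occurrence.toNat - 1) + 1 := by omega
      rw [hk]
      exact loopA_empty txt marker hm _ _
    · rw [if_neg (by simp only [not_or]; exact ⟨h1, hm⟩)]
      have hk : occurrence.toNat = (occurrence.toNat - 1) + 1 := by omega
      have hocc : occurrence = ((occurrence.toNat : Nat) : Int) := by omega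
      have hA := loopA_spec txt marker hm (occurrence.toNat - 1) 0 (by simp) (-1)
      simp only [Nat.cast_zero, List.drop_zero, zero_add] at hA
      rw [← hk] at hA
      rw [hA, PySem.List.slice_to _ (by omega : (0:Int) ≤ occurrence)]
      by_cases hc : (PySem.Chars.splitOn txt.toList marker.toList).length ≤ occurrence.toNat
      · rw [if_pos hc, if_pos (by omega)]
      · rw [if_neg hc, if_neg (by omega)]
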